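-- pv_equiv track=rewrite | github.com/38programmer61/cmpe150-spring2024-monday-lab | Lab05/Docs/exercise/solutions.py | digiiits
-- ===== SOURCE A (Python) =====
-- def digiiits(num):
--     sum_of_even_digits = 0
--     n_digits = 0
--     while num > 0:
--         n_digits += 1
--         if (num % 10) % 2 == 0:
--             sum_of_even_digits += num % 10
--         num = num // 10
--     return n_digits, sum_of_even_digits
-- ===== SOURCE B (Python) =====
-- def digiiits(num):
--     if num <= 0:
--         return (0, 0)
--     s = str(num)
--     return (len(s), sum(int(c) for c in s if int(c) % 2 == 0))
-- ===== Notes on version B (the rewrite author's own statement) =====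
-- stated objective: idiomatic
-- what changed: B computes the digit count and even-digit sum from the decimal string str(num) in one comprehension pass instead of A's while-loop that repeatedly takes num % 10 and num // 10.
import Mathlib
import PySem

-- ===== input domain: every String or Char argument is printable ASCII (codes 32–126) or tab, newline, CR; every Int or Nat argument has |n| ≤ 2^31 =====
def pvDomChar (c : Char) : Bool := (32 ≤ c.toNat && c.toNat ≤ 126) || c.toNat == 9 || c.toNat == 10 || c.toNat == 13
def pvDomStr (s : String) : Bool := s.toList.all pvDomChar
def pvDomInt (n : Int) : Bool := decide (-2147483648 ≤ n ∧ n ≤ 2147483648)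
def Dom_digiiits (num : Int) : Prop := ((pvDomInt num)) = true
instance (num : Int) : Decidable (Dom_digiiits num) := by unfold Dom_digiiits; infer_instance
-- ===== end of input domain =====

-- ===== PORT A =====
-- B computes the same (digit count, even-digit sum) from the decimal string of num
-- instead of A's arithmetic %10 // 10 peeling loop (objective: more idiomatic; same cost).

-- while num > 0: n_digits += 1; if (num % 10) % 2 == 0: sum += num % 10; num = num // 10
def digiiitsLoop (num nDigits sumEven : Int) : Int × Int :=
  if h : 0 < num then
    let d := PySem.Int.mod num 10
    digiiitsLoop (PySem.Int.floordiv num 10) (nDigits + 1)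
      (if PySem.Int.mod d 2 == 0 then sumEven + d else sumEven)
  else (nDigits, sumEven)
termination_by num.toNat
decreasing_by
  simp only [PySem.Int.floordiv]
  simp [Int.fdiv_eq_ediv]
  omega

def digiiits (num : Int) : Int × Int :=
  digiiitsLoop num 0 0

-- ===== PORT B =====
-- int(c) for a single decimal digit character c is ported exactly as (c.toNat : Int) - 48
-- (str(num) for num > 0 consists solely of the characters '0'..'9').
def digiiits_alt (num : Int) : Int × Int :=
  if num ≤ 0 then (0, 0)
  else
    let cs := PySem.Int.toChars num
    ((cs.length : Int),
      cs.foldl (fun s c =>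
        if ((c.toNat : Int) - 48) % 2 == 0 then s + ((c.toNat : Int) - 48) else s) 0)

-- ===== PRECONDITION & SPEC =====
def Spec_digiiits (num : Int) (out : Int × Int) : Prop := out = digiiits_alt num
instance (num : Int) (out : Int × Int) : Decidable (Spec_digiiits num out) := by unfold Spec_digiiits; infer_instance

-- ===== CLAIM (what is proved, stated in full; the proofs are below) =====
def Claim_equal_digiiits : Prop := ∀ (num : Int), Dom_digiiits num → Spec_digiiits num (digiiits num)

-- ===== LEMMAS AND PROOFS =====

-- even-digit sum of a digit list (least-significant digit first), as an integer
def evenSum : List Nat → Int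
  | [] => 0
  | d :: L => (if d % 2 = 0 then (d : Int) else 0) + evenSum L

theorem digiiitsLoop_digits (n : Nat) : ∀ (nd s : Int),
    digiiitsLoop (n : Int) nd s =
      (nd + ((Nat.digits 10 n).length : Int), s + evenSum (Nat.digits 10 n)) := by
  induction n using Nat.strong_induction_on with
  | _ n ih =>
    intro nd s
    by_cases hn : 0 < n
    · have hmod : PySem.Int.mod (n : Int) 10 = ((n % 10 : Nat) : Int) := by
        simp [PySem.Int.mod, Int.fmod_eq_emod]
      have hdiv : PySem.Int.floordiv (n : Int) 10 = ((n / 10 : Nat) : Int) := by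
        simp [PySem.Int.floordiv, Int.fdiv_eq_ediv]
      have hlt : n / 10 < n := Nat.div_lt_self hn (by norm_num)
      have hdig : Nat.digits 10 n = n % 10 :: Nat.digits 10 (n / 10) :=
        Nat.digits_def' (by norm_num) hn
      have hcond : (PySem.Int.mod ((n % 10 : Nat) : Int) 2 == 0) = decide (n % 10 % 2 = 0) := by
        simp only [PySem.Int.mod]
        have h2 : Int.fmod ((n % 10 : Nat) : Int) 2 = ((n % 10 % 2 : Nat) : Int) := by
          simp [Int.fmod_eq_emod]
        rw [h2]
        rcases Nat.mod_two_eq_zero_or_one (n % 10) with h | h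
        · simp [h]
        · simp [h]
      conv_lhs => rw [digiiitsLoop]
      rw [dif_pos (show (0:Int) < (n : Int) by exact_mod_cast hn)]
      simp only [hmod, hdiv, hcond]
      rw [ih (n / 10) hlt, hdig]
      simp only [evenSum, List.length_cons, Prod.mk.injEq]
      refine ⟨by push_cast; ring, ?_⟩
      by_cases hpar : n % 10 % 2 = 0
      · rw [if_pos (by simp only [decide_eq_true_eq]; omega), if_pos hpar]; ring
      · rw [if_neg (by simp only [decide_eq_true_eq]; omega), if_neg hpar]; ring
    · conv_lhs => rw [digiiitsLoop]
      have : n = 0 := by omega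
      subst this
      simp [evenSum]

-- the characters produced by Nat.toDigitsCore for positive n are the base-10 digits, most
-- significant first
theorem toDigitsCore_digits (f : Nat) : ∀ (n : Nat) (acc : List Char), 0 < n → n ≤ f →
    Nat.toDigitsCore 10 f n acc = ((Nat.digits 10 n).map Nat.digitChar).reverse ++ acc := by
  induction f with
  | zero => intro n acc hn hf; omega
  | succ f ih =>
    intro n acc hn hf
    rw [Nat.toDigitsCore]
    have hdig : Nat.digits 10 n = n % 10 :: Nat.digits 10 (n / 10) :=
      Nat.digits_def' (by norm_num) hn
    by_cases h0 : n / 10 = 0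
    · simp [h0, hdig]
    · have hlt : n / 10 < n := Nat.div_lt_self hn (by norm_num)
      rw [if_neg h0, ih (n / 10) _ (by omega) (by omega), hdig]
      simp

theorem digitChar_toNat (d : Nat) (hd : d < 10) : (Nat.digitChar d).toNat = 48 + d := by
  interval_cases d <;> decide

theorem foldl_digitChar (L : List Nat) (hL : ∀ d ∈ L, d < 10) : ∀ (s : Int),
    ((L.map Nat.digitChar).reverse).foldl (fun s c =>
        if ((c.toNat : Int) - 48) % 2 == 0 then s + ((c.toNat : Int) - 48) else s) s
      = s + evenSum L := by
  induction L with
  | nil => intro s; simp [evenSum]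
  | cons a L ih =>
    intro s
    have ha : a < 10 := hL a (by simp)
    have hv : ((Nat.digitChar a).toNat : Int) - 48 = (a : Int) := by
      rw [digitChar_toNat a ha]; push_cast; ring
    simp only [List.map_cons, List.reverse_cons, List.foldl_append, List.foldl_cons,
      List.foldl_nil]
    rw [ih (fun d hd => hL d (by simp [hd]))]
    simp only [hv, evenSum]
    by_cases hpar : a % 2 = 0
    · rw [if_pos (by simp only [beq_iff_eq]; omega), if_pos hpar]; ring
    · rw [if_neg (by simp only [beq_iff_eq]; omega), if_neg hpar]; ring

-- ===== VERDICT (by name: the statement is the Claim_ definition above) =====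
theorem digiiits_spec : Claim_equal_digiiits := by
  intro num _
  unfold Spec_digiiits digiiits digiiits_alt
  by_cases h : num ≤ 0
  · rw [if_pos h]
    conv_lhs => rw [digiiitsLoop]
    rw [dif_neg (by omega)]
  · rw [if_neg h]
    have hpos : 0 < num.toNat := by omega
    have hn : num = ((num.toNat : Nat) : Int) := by omega
    rw [hn]
    have htc : PySem.Int.toChars ((num.toNat : Nat) : Int)
        = ((Nat.digits 10 num.toNat).map Nat.digitChar).reverse := by
      rw [PySem.Int.toChars, if_neg (by omega)]
      simp only [Int.toNat_natCast]
      rw [Nat.toDigits]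
      exact (toDigitsCore_digits (num.toNat + 1) num.toNat [] hpos (by omega)).trans
        (List.append_nil _)
    rw [digiiitsLoop_digits num.toNat 0 0, htc]
    simp only [foldl_digitChar (Nat.digits 10 num.toNat)
      (fun d hd => Nat.digits_lt_base (by norm_num) hd)]
    simp
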